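-- pv_equiv track=rewrite | github.com/leetonidas/linear_code | solve.py | sbfs
-- ===== SOURCE A (Python) =====
-- def sbfs(graph, s):
--     cur = {s}
--     visited = set()
--     res = []
--     while cur:
--         nxt = set()
--         for e in sorted(list(cur)):
--             res.append(e)
--             nxt.update({t for t, c in enumerate(graph[e]) if c})
--         visited.update(cur)
--         cur = nxt - visited
--     return res
-- ===== SOURCE B (Python) =====
-- def sbfs(graph, s):
--     n = len(graph)
--     visited = set()
--     res = []
--     frontier = [s]
--     while frontier:
--         res.extend(frontier)
--         visited.update(frontier)
--         frontier = [t for t in range(n)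
--                     if t not in visited and any(t < len(graph[e]) and graph[e][t] for e in frontier)]
--     return res
-- ===== Notes on version B (the rewrite author's own statement) =====
-- stated objective: alternative
-- what changed: A builds each next BFS level by unioning per-row neighbour sets of the frontier and sorts every level before emitting; B keeps a visited set and produces each next level already in order by one transposed scan over the node indices 0..n-1, testing each candidate for an incoming edge from the current frontier, so the per-level set unions and sorts disappear.
-- outside the precondition, e.g. on sbfs([[0, 0], [0, 0, 1]], 0): A returns [0], B returns [0]
import Mathlib
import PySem

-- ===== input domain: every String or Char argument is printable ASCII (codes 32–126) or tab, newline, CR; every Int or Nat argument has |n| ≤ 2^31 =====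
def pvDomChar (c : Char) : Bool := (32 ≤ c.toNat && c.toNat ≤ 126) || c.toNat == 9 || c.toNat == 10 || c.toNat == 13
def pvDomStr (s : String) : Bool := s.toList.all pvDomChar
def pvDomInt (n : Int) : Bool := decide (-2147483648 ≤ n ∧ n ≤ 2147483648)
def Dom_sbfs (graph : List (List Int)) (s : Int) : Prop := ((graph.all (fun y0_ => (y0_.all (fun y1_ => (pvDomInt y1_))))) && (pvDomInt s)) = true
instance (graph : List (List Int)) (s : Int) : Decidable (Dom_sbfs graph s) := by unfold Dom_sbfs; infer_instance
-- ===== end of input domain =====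

-- B replaces A's per-level neighbour-set unions + per-level sort by a transposed scan: per level,
-- one pass over the node indices 0..n-1 (already in order) testing for an incoming edge from the
-- current frontier (objective: alternative decomposition, no speed claim).

-- ===== PORT A =====
-- {t for t, c in enumerate(graph[e]) if c}
def nbrsA (row : List Int) : List Int :=
  ((PySem.List.enumerate row).filter (fun q => q.2 != 0)).map (fun q => q.1)

-- nxt.update({...}) for one e (IndexError on graph[e] modelled as a no-op: unreachable inside Pre_)
def nxtStep (graph : List (List Int)) (nxt : PySem.Set Int) (e : Int) : PySem.Set Int :=
  match PySem.List.pyGet? graph e with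
  | none => nxt
  | some row => nxt.update (nbrsA row)

-- the while-loop of A; fuel only makes the recursion structural (inside Pre_ the loop body runs
-- at most graph.length+1 times, so exhausted fuel can only return the already-complete result)
def sbfsLoopA (graph : List (List Int)) : Nat → PySem.Set Int → PySem.Set Int → List Int → List Int
  | 0, _cur, _visited, res => res
  | fuel+1, cur, visited, res =>
    if cur = [] then res
    else
      let st := (PySem.List.sorted cur (fun x => x)).foldl
        (fun (p : List Int × PySem.Set Int) e => (p.1 ++ [e], nxtStep graph p.2 e))
        (res, PySem.Set.empty)
      let visited' := PySem.Set.update visited cur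
      sbfsLoopA graph fuel (PySem.Set.diff st.2 visited') visited' st.1

def sbfs (graph : List (List Int)) (s : Int) : List Int :=
  sbfsLoopA graph (graph.length + 1) (PySem.Set.ofList [s]) PySem.Set.empty []

-- ===== PORT B =====
-- t < len(graph[e]) and graph[e][t]  (IndexError on graph[e] modelled as False: unreachable inside Pre_)
def edgeB (graph : List (List Int)) (t e : Int) : Bool :=
  match PySem.List.pyGet? graph e with
  | none => false
  | some row => decide (t < (row.length : Int)) && (PySem.List.pyGetD row t 0 != 0)

-- the while-loop of B; same fuel remark as for A
def sbfsLoopB (graph : List (List Int)) (n : Nat) : Nat → List Int → PySem.Set Int → List Int → List Int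
  | 0, _frontier, _visited, res => res
  | fuel+1, frontier, visited, res =>
    if frontier = [] then res
    else
      let res' := res ++ frontier
      let visited' := PySem.Set.update visited frontier
      let frontier' := (PySem.List.pyRange 0 (n : Int)).filter
        (fun t => !(PySem.Set.contains visited' t) && frontier.any (fun e => edgeB graph t e))
      sbfsLoopB graph n fuel frontier' visited' res'

def sbfs_alt (graph : List (List Int)) (s : Int) : List Int :=
  sbfsLoopB graph graph.length (graph.length + 1) [s] PySem.Set.empty []

-- ===== PRECONDITION & SPEC =====
-- Pre_ requires the start to be a valid (possibly negative) Python index of graph and every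
-- nonzero matrix entry to name an existing node; this excludes exactly the shapes that can make A
-- raise IndexError, and with them some inputs A returns on only because their offending nonzero
-- out-of-range column is never reached — on those A and B in fact agree.
def Pre_sbfs (graph : List (List Int)) (s : Int) : Prop :=
  -(graph.length : Int) ≤ s ∧ s < (graph.length : Int) ∧
    ∀ row ∈ graph, ∀ i ∈ List.range row.length, row.getD i 0 ≠ 0 → i < graph.length
instance (graph : List (List Int)) (s : Int) : Decidable (Pre_sbfs graph s) := by
  unfold Pre_sbfs; infer_instance
def pvWitness_sbfs : List (List Int) × Int := ([[0, 1], [0, 0]], 0)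

def Spec_sbfs (graph : List (List Int)) (s : Int) (out : List Int) : Prop := out = sbfs_alt graph s
instance (graph : List (List Int)) (s : Int) (out : List Int) : Decidable (Spec_sbfs graph s out) := by
  unfold Spec_sbfs; infer_instance

-- ===== CLAIM (what is proved, stated in full; the proofs are below) =====
def Claim_equal_sbfs : Prop := ∀ (graph : List (List Int)) (s : Int),
  Dom_sbfs graph s → Pre_sbfs graph s → Spec_sbfs graph s (sbfs graph s)

-- ===== LEMMAS AND PROOFS =====

-- the row graph[e] that a valid (possibly negative) Python index e selects
def rowOf (graph : List (List Int)) (e : Int) : List Int :=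
  (PySem.List.pyGet? graph e).getD []

lemma pyGet?_rowOf (graph : List (List Int)) (e : Int)
    (h0 : -(graph.length : Int) ≤ e) (h1 : e < (graph.length : Int)) :
    PySem.List.pyGet? graph e = some (rowOf graph e) ∧ rowOf graph e ∈ graph := by
  unfold rowOf
  by_cases he : 0 ≤ e
  · have hlt : e.toNat < graph.length := by omega
    have h := PySem.List.pyGet?_natCast graph e.toNat
    rw [show ((e.toNat : Nat) : Int) = e from by omega] at h
    rw [h, List.getElem?_eq_getElem hlt]
    exact ⟨rfl, List.getElem_mem hlt⟩
  · have hlt : graph.length - (-e).toNat < graph.length := by omega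
    have h : PySem.List.pyGet? graph e = graph[graph.length - (-e).toNat]? := by
      simp only [PySem.List.pyGet?, PySem.List.pyIdx?]
      rw [if_neg he, if_pos h0]
      rfl
    rw [h, List.getElem?_eq_getElem hlt]
    exact ⟨rfl, List.getElem_mem hlt⟩

-- membership in A's neighbour comprehension
lemma mem_enum_filter (row : List Int) (k y : Int) :
    y ∈ ((PySem.List.enumerate row k).filter (fun q => q.2 != 0)).map (fun q => q.1) ↔
      ∃ i : Nat, i < row.length ∧ row.getD i 0 ≠ 0 ∧ y = k + (i : Int) := by
  induction row generalizing k with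
  | nil => simp [PySem.List.enumerate]
  | cons a l ih =>
    rw [show PySem.List.enumerate (a :: l) k = (k, a) :: PySem.List.enumerate l (k + 1) by
      simp [PySem.List.enumerate]]
    rw [List.filter_cons]
    by_cases ha : a = 0
    · rw [if_neg (by simp [ha])]
      rw [ih]
      constructor
      · rintro ⟨i, hi, hne, hy⟩
        exact ⟨i + 1, by simp only [List.length_cons]; omega, by simpa using hne,
          by push_cast; omega⟩
      · rintro ⟨i, hi, hne, hy⟩
        match i with
        | 0 => exact absurd ha (by simpa using hne)
        | j + 1 =>
          exact ⟨j, by simp only [List.length_cons] at hi; omega, by simpa using hne,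
            by push_cast at hy ⊢; omega⟩
    · rw [if_pos (by simp [ha])]
      simp only [List.map_cons, List.mem_cons]
      rw [ih]
      constructor
      · rintro (rfl | ⟨i, hi, hne, hy⟩)
        · exact ⟨0, by simp, by simpa using ha, by simp⟩
        · exact ⟨i + 1, by simp only [List.length_cons]; omega, by simpa using hne,
            by push_cast; omega⟩
      · rintro ⟨i, hi, hne, hy⟩
        match i with
        | 0 => left; push_cast at hy; omega
        | j + 1 =>
          right
          exact ⟨j, by simp only [List.length_cons] at hi; omega, by simpa using hne,
            by push_cast at hy ⊢; omega⟩

lemma mem_nbrsA (row : List Int) (y : Int) :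
    y ∈ nbrsA row ↔ ∃ i : Nat, i < row.length ∧ row.getD i 0 ≠ 0 ∧ y = (i : Int) := by
  unfold nbrsA
  rw [mem_enum_filter]
  simp

lemma nxt_foldl (graph : List (List Int)) (l : List Int) (s0 : PySem.Set Int)
    (hl : ∀ e ∈ l, PySem.List.pyGet? graph e = some (rowOf graph e)) (h0 : s0.Nodup) :
    (l.foldl (nxtStep graph) s0).Nodup ∧
      (∀ y, y ∈ l.foldl (nxtStep graph) s0 ↔
        y ∈ s0 ∨ ∃ e ∈ l, y ∈ nbrsA (rowOf graph e)) := by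
  induction l generalizing s0 with
  | nil => exact ⟨h0, by simp⟩
  | cons e l ih =>
    have hstep : nxtStep graph s0 e = s0.update (nbrsA (rowOf graph e)) := by
      unfold nxtStep
      rw [hl e (by simp)]
    simp only [List.foldl_cons, hstep]
    obtain ⟨hnd, hmem⟩ := ih (s0.update (nbrsA (rowOf graph e)))
      (fun x hx => hl x (by simp [hx])) (PySem.Set.nodup_update _ _ h0)
    refine ⟨hnd, fun y => ?_⟩
    rw [hmem y, PySem.Set.mem_update]
    constructor
    · rintro ((h | h) | ⟨e', he', h⟩)
      · exact Or.inl h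
      · exact Or.inr ⟨e, by simp, h⟩
      · exact Or.inr ⟨e', by simp [he'], h⟩
    · rintro (h | ⟨e', he', h⟩)
      · exact Or.inl (Or.inl h)
      · rcases List.mem_cons.mp he' with rfl | he'
        · exact Or.inl (Or.inr h)
        · exact Or.inr ⟨e', he', h⟩

-- one lock-step induction over the (shared) fuel: A's (cur, visited) corresponds to B's
-- (frontier = sorted cur, visited with the same members) and the accumulated outputs stay equal
lemma loopAB (graph : List (List Int))
    (hcol : ∀ row ∈ graph, ∀ i ∈ List.range row.length, row.getD i 0 ≠ 0 → i < graph.length) :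
    ∀ (fuel : Nat) (cur visitedA visitedB : PySem.Set Int) (res : List Int),
      cur.Nodup →
      (∀ e ∈ cur, -(graph.length : Int) ≤ e ∧ e < (graph.length : Int)) →
      (∀ y : Int, y ∈ visitedB ↔ y ∈ visitedA) →
      sbfsLoopA graph fuel cur visitedA res
        = sbfsLoopB graph graph.length fuel (PySem.List.sorted cur (fun x => x)) visitedB res := by
  intro fuel
  induction fuel with
  | zero => intro cur visitedA visitedB res _ _ _; rfl
  | succ fuel ih =>
    intro cur visitedA visitedB res hnd hbnd hvis
    by_cases hc : cur = []
    · subst hc; rfl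
    · have hsc : PySem.List.sorted cur (fun x : Int => x) ≠ [] := by
        simpa [PySem.List.sorted_eq_nil_iff] using hc
      simp only [sbfsLoopA, sbfsLoopB, if_neg hc, if_neg hsc]
      rw [PySem.List.foldl_prod_mk (f := fun (r : List Int) e => r ++ [e]) (g := nxtStep graph),
        PySem.List.foldl_append_singleton_eq_self]
      dsimp only
      set sc := PySem.List.sorted cur (fun x : Int => x) with hscdef
      have hscmem : ∀ e, e ∈ sc ↔ e ∈ cur := fun e =>
        (PySem.List.sorted_perm cur (fun x => x) false).mem_iff
      have hget : ∀ e ∈ cur, PySem.List.pyGet? graph e = some (rowOf graph e) := by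
        intro e he
        obtain ⟨h0, h1⟩ := hbnd e he
        exact (pyGet?_rowOf graph e h0 h1).1
      have hrowmem : ∀ e ∈ cur, rowOf graph e ∈ graph := by
        intro e he
        obtain ⟨h0, h1⟩ := hbnd e he
        exact (pyGet?_rowOf graph e h0 h1).2
      obtain ⟨hnxt_nd, hnxt_mem⟩ := nxt_foldl graph sc PySem.Set.empty
        (fun e he => hget e ((hscmem e).mp he)) (by simp [PySem.Set.empty])
      set nxt := sc.foldl (nxtStep graph) PySem.Set.empty with hnxtdef
      set visitedA' := PySem.Set.update visitedA cur with hvadef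
      set visitedB' := PySem.Set.update visitedB sc with hvbdef
      -- the two visited states keep the same members
      have hvis' : ∀ y : Int, y ∈ visitedB' ↔ y ∈ visitedA' := by
        intro y
        rw [hvadef, hvbdef, PySem.Set.mem_update, PySem.Set.mem_update, hvis y, hscmem y]
      -- membership in A's new frontier
      have hcur'_mem : ∀ y, y ∈ PySem.Set.diff nxt visitedA' ↔
          ((∃ e ∈ cur, y ∈ nbrsA (rowOf graph e)) ∧ ¬(y ∈ visitedA ∨ y ∈ cur)) := by
        intro y
        rw [PySem.Set.mem_diff, hvadef, PySem.Set.mem_update, hnxt_mem y]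
        simp only [PySem.Set.empty, List.not_mem_nil, false_or]
        constructor
        · rintro ⟨⟨e, he, h⟩, hnv⟩
          exact ⟨⟨e, (hscmem e).mp he, h⟩, hnv⟩
        · rintro ⟨⟨e, he, h⟩, hnv⟩
          exact ⟨⟨e, (hscmem e).mpr he, h⟩, hnv⟩
      -- every column a nonzero entry names is a real node: bounds for the new frontier
      have hnbnd : ∀ e ∈ cur, ∀ y ∈ nbrsA (rowOf graph e), 0 ≤ y ∧ y < (graph.length : Int) := by
        intro e he y hy
        obtain ⟨i, hi, hnz, rfl⟩ := (mem_nbrsA _ y).mp hy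
        have := hcol _ (hrowmem e he) i (List.mem_range.mpr hi) hnz
        exact ⟨by omega, by omega⟩
      have hbnd' : ∀ y ∈ PySem.Set.diff nxt visitedA',
          -(graph.length : Int) ≤ y ∧ y < (graph.length : Int) := by
        intro y hy
        obtain ⟨⟨e, he, h⟩, -⟩ := (hcur'_mem y).mp hy
        obtain ⟨h0, h1⟩ := hnbnd e he y h
        exact ⟨by omega, h1⟩
      -- B's new frontier equals sorted (A's new frontier)
      set frontier' := (PySem.List.pyRange 0 (graph.length : Int)).filter
        (fun t => !(PySem.Set.contains visitedB' t) && sc.any (fun e => edgeB graph t e))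
        with hfdef
      have hfr_mem : ∀ a : Int, a ∈ frontier' ↔ a ∈ PySem.Set.diff nxt visitedA' := by
        intro a
        rw [hfdef, List.mem_filter, PySem.List.mem_pyRange_one, hcur'_mem a]
        simp only [Bool.and_eq_true, Bool.not_eq_true', List.any_eq_true]
        constructor
        · rintro ⟨⟨ha0, han⟩, hnc, e, hesc, hedge⟩
          have hcast : a = ((a.toNat : Nat) : Int) := by omega
          have he' : e ∈ cur := (hscmem e).mp hesc
          simp only [edgeB, hget e he', Bool.and_eq_true, decide_eq_true_eq, bne_iff_ne,
            ne_eq] at hedge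
          obtain ⟨hlt, hnz⟩ := hedge
          rw [hcast, PySem.List.pyGetD_natCast] at hnz
          refine ⟨⟨e, he', (mem_nbrsA _ a).mpr ⟨a.toNat, by omega, hnz, by omega⟩⟩, ?_⟩
          intro hmem
          have : a ∈ visitedB' := by
            rw [hvis' a, hvadef, PySem.Set.mem_update]
            exact hmem
          rw [← PySem.Set.contains_iff visitedB' a] at this
          rw [this] at hnc
          exact absurd hnc (by simp)
        · rintro ⟨⟨e, he, hnb⟩, hnv⟩
          obtain ⟨i, hi, hnz, rfl⟩ := (mem_nbrsA _ _).mp hnb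
          obtain ⟨h0, h1⟩ := hnbnd e he _ hnb
          refine ⟨⟨h0, h1⟩, ?_, e, (hscmem e).mpr he, ?_⟩
          · cases h : PySem.Set.contains visitedB' (i : Int)
            · rfl
            · exfalso
              have := (PySem.Set.contains_iff visitedB' (i : Int)).mp h
              rw [hvis' _, hvadef, PySem.Set.mem_update] at this
              exact hnv this
          · simp only [edgeB, hget e he, Bool.and_eq_true, decide_eq_true_eq, bne_iff_ne, ne_eq]
            refine ⟨by omega, ?_⟩
            rw [PySem.List.pyGetD_natCast]
            exact hnz
      have hpair : frontier'.Pairwise (· < ·) := by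
        rw [hfdef]
        refine List.Pairwise.filter _ ?_
        rw [PySem.List.pyRange_zero_natCast]
        exact List.Pairwise.map _ (fun a b h => by exact_mod_cast h) List.pairwise_lt_range
      have hndf : frontier'.Nodup := hpair.imp (fun h => ne_of_lt h)
      have hnd' : (PySem.Set.diff nxt visitedA').Nodup := PySem.Set.nodup_diff _ _ hnxt_nd
      have hperm : frontier'.Perm (PySem.Set.diff nxt visitedA') :=
        (List.perm_ext_iff_of_nodup hndf hnd').mpr hfr_mem
      have hfr : PySem.List.sorted (PySem.Set.diff nxt visitedA') (fun x : Int => x) = frontier' :=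
        PySem.List.sorted_eq_of_perm_of_pairwise_lt _ _ _ hperm hpair
      rw [← hfr]
      exact ih (PySem.Set.diff nxt visitedA') visitedA' visitedB' (res ++ sc) hnd' hbnd' hvis'

-- ===== VERDICT (by name: the statement is the Claim_ definition above) =====
theorem sbfs_spec : Claim_equal_sbfs := by
  unfold Claim_equal_sbfs
  intro graph s _hdom hpre
  obtain ⟨hs0, hsn, hcol⟩ := hpre
  unfold Spec_sbfs sbfs sbfs_alt
  have hone : PySem.Set.ofList [s] = [s] := rfl
  have hsrt : PySem.List.sorted [s] (fun x : Int => x) = [s] := rfl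
  have h := loopAB graph hcol (graph.length + 1) (PySem.Set.ofList [s]) PySem.Set.empty
    PySem.Set.empty []
    (by rw [hone]; exact List.nodup_singleton s)
    (by
      intro e he
      rw [hone] at he
      have : e = s := by simpa using he
      subst this
      exact ⟨hs0, hsn⟩)
    (fun y => Iff.rfl)
  rw [hone, hsrt] at h
  exact h
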